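-- pv_equiv track=rewrite | github.com/gxnda/project-euler-python | util.py | prime_sieve_and_pandigital
-- ===== SOURCE A (Python) =====
-- def prime_sieve_and_pandigital(limit):
--     prime = [True for _ in range(limit + 1)]
--     finalised = []
--     p = 2
--     while p ** 2 <= limit:
--         if prime[p]:
--             for i in range(p * p, limit + 1, p):
--                 prime[i] = False
--         p += 1
--     for i in range(2, len(prime)):
--         if prime[i] and is_pandigital(str(i)):
--             finalised.append(i)
--
--     return finalised  # returns list
--
-- def is_pandigital(string: str, comparison_string="123456789") -> bool:
--     length = len(str(string))
--     comparison_string = ""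
--     for i in range(1, length + 1):
--         comparison_string += str(i)
--     if set(string) == set(comparison_string) and len(string) == len(
--             comparison_string):
--         return True
--     return False
-- ===== SOURCE B (Python) =====
-- def prime_sieve_and_pandigital(limit):
--     return [i for i in range(2, limit + 1)
--             if is_pandigital(str(i)) and is_prime(i)]
--
--
-- def is_prime(n):
--     if n < 2:
--         return False
--     d = 2
--     while d * d <= n:
--         if n % d == 0:
--             return False
--         d += 1
--     return True
--
--
-- def is_pandigital(string: str, comparison_string="123456789") -> bool:
--     length = len(str(string))
--     comparison_string = ""
--     for i in range(1, length + 1):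
--         comparison_string += str(i)
--     if set(string) == set(comparison_string) and len(string) == len(
--             comparison_string):
--         return True
--     return False
-- ===== Notes on version B (the rewrite author's own statement) =====
-- stated objective: simpler
-- what changed: B replaces the Sieve-of-Eratosthenes boolean array (allocate limit+1 flags, cross off multiples, then scan) by a single comprehension over range(2, limit+1) that keeps i when it is pandigital and passes a direct trial-division primality test; the pandigital filter is the unchanged helper.
import Mathlib
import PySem

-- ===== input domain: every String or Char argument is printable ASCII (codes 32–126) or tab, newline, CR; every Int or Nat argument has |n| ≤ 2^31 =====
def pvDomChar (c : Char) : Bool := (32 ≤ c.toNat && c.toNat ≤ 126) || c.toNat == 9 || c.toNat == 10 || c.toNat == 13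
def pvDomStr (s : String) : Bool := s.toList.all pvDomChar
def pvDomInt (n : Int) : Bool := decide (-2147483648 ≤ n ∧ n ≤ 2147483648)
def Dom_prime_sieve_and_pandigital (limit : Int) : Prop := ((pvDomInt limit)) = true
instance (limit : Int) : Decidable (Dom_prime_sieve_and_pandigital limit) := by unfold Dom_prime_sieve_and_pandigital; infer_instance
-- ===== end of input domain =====

-- B replaces A's Sieve-of-Eratosthenes boolean array by a direct per-number trial-division
-- primality test inside one comprehension (objective: simpler); the pandigital helper is
-- shared unchanged by both programs.

-- ===== PORT A =====

-- shared helper: literal port of is_pandigital (textually identical in Source A and Source B); the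
-- dead default parameter comparison_string is dropped since it is overwritten before any use.
def is_pandigital (string : String) : Bool :=
  let length : Int := PySem.Str.len string
  let comparison_string : List Char :=
    (PySem.List.pyRange 1 (length + 1) 1).foldl (fun acc i => acc ++ PySem.Int.toChars i) []
  if PySem.Set.equal (PySem.Set.ofList string.toList) (PySem.Set.ofList comparison_string)
      && (PySem.Str.len string == (comparison_string.length : Int)) then true
  else false

-- inner loop 'for i in range(p*p, limit+1, p): prime[i] = False' (indices always in range)
def sieveMark (limit p : Int) (fl : List Bool) : List Bool :=
  (PySem.List.pyRange (p * p) (limit + 1) p).foldl (fun f i => f.set i.toNat false) fl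

-- termination helper for both while loops: p*p ≤ limit forces p ≤ limit
theorem pv_le_of_sq_le (p limit : Int) (h : p * p ≤ limit) : p ≤ limit := by
  rcases (by omega : p ≤ 0 ∨ 1 ≤ p) with hp | hp
  · linarith [mul_self_nonneg p]
  · linarith [mul_le_mul_of_nonneg_left hp (show (0:Int) ≤ p by omega)]

-- 'while p ** 2 <= limit: if prime[p]: <mark>; p += 1' (prime[p] is always in range here)
def sieveLoop (limit : Int) (fl : List Bool) (p : Int) : List Bool :=
  if h : p * p ≤ limit then
    sieveLoop limit (if fl.getD p.toNat false then sieveMark limit p fl else fl) (p + 1)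
  else fl
termination_by (limit + 1 - p).toNat
decreasing_by
  have := pv_le_of_sq_le p limit h
  omega

def prime_sieve_and_pandigital (limit : Int) : List Int :=
  let prime := List.replicate (limit + 1).toNat true
  let prime := sieveLoop limit prime 2
  (PySem.List.pyRange 2 (prime.length : Int) 1).foldl
    (fun acc i =>
      if prime.getD i.toNat false && is_pandigital (PySem.Int.toStr i) then acc ++ [i]
      else acc) []

-- ===== PORT B =====

-- 'd = 2; while d*d <= n: if n % d == 0: return False; d += 1; return True'
def is_prime_loop (n d : Int) : Bool :=
  if h : d * d ≤ n then
    if PySem.Int.mod n d == 0 then false else is_prime_loop n (d + 1)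
  else true
termination_by (n + 1 - d).toNat
decreasing_by
  have := pv_le_of_sq_le d n h
  omega

def is_prime (n : Int) : Bool := if n < 2 then false else is_prime_loop n 2

def prime_sieve_and_pandigital_alt (limit : Int) : List Int :=
  (PySem.List.pyRange 2 (limit + 1) 1).filter
    (fun i => is_pandigital (PySem.Int.toStr i) && is_prime i)

-- ===== PRECONDITION & SPEC =====
def Spec_prime_sieve_and_pandigital (limit : Int) (out : List Int) : Prop := out = prime_sieve_and_pandigital_alt limit
instance (limit : Int) (out : List Int) : Decidable (Spec_prime_sieve_and_pandigital limit out) := by unfold Spec_prime_sieve_and_pandigital; infer_instance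

-- ===== CLAIM (what is proved, stated in full; the proofs are below) =====
def Claim_equal_prime_sieve_and_pandigital : Prop := ∀ (limit : Int), Dom_prime_sieve_and_pandigital limit → Spec_prime_sieve_and_pandigital limit (prime_sieve_and_pandigital limit)

-- ===== LEMMAS AND PROOFS =====

-- 'j is crossed off by some prime q < P whose square is within the sieve bound'
def Marked (limit P : Int) (j : Nat) : Prop :=
  ∃ q m : Nat, Nat.Prime q ∧ (q : Int) < P ∧ (q : Int) * q ≤ limit ∧ q ≤ m ∧ q * m = j

-- loop-exit form: no bound on q other than q*q ≤ limit
def MarkedF (limit : Int) (j : Nat) : Prop :=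
  ∃ q m : Nat, Nat.Prime q ∧ (q : Int) * q ≤ limit ∧ q ≤ m ∧ q * m = j

theorem length_foldl_set (l : List Int) (fl : List Bool) :
    (l.foldl (fun f i => f.set i.toNat false) fl).length = fl.length := by
  induction l generalizing fl with
  | nil => rfl
  | cons a t ih => simp [List.foldl_cons, ih]

theorem getD_set_false (fl : List Bool) (k j : Nat) :
    (fl.set k false).getD j false =
      if k = j ∧ j < fl.length then false else fl.getD j false := by
  rw [List.getD_eq_getElem?_getD, List.getD_eq_getElem?_getD, List.getElem?_set]
  by_cases hk : k = j
  · subst hk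
    by_cases hj : k < fl.length
    · simp [hj]
    · simp [hj]
  · simp [hk]

theorem getD_foldl_set (l : List Int) (fl : List Bool) (j : Nat) :
    (l.foldl (fun f i => f.set i.toNat false) fl).getD j false =
      if (∃ i ∈ l, i.toNat = j) ∧ j < fl.length then false else fl.getD j false := by
  induction l generalizing fl with
  | nil => simp
  | cons a t ih =>
    rw [List.foldl_cons, ih, List.length_set, getD_set_false]
    by_cases hj : j < fl.length
    · by_cases ha : a.toNat = j
      · simp [hj, ha]
      · by_cases ht : ∃ i ∈ t, i.toNat = j
        · simp [hj, ha, ht]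
        · simp [hj, ha, ht]
    · simp [hj]

theorem length_sieveLoop (limit : Int) (fl : List Bool) (p : Int) :
    (sieveLoop limit fl p).length = fl.length := by
  fun_induction sieveLoop limit fl p with
  | case1 fl p h ih =>
    simp only [dite_eq_ite] at ih
    rw [ih]
    split_ifs <;> simp [sieveMark, length_foldl_set]
  | case2 fl p h => rfl

theorem sieveLoop_correct (limit : Int) (fl : List Bool) (p : Int) :
    2 ≤ p → fl.length = (limit + 1).toNat →
    (∀ j, j < fl.length → (fl.getD j false = false ↔ Marked limit p j)) →
    ∀ j, j < fl.length → ((sieveLoop limit fl p).getD j false = false ↔ MarkedF limit j) := by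
  fun_induction sieveLoop limit fl p with
  | case1 fl p h ih =>
    intro hp hlen hinv
    simp only [dite_eq_ite] at ih
    have hplim : p ≤ limit := pv_le_of_sq_le p limit h
    have hpj : p.toNat < fl.length := by omega
    by_cases hflag : fl.getD p.toNat false = true
    · rw [if_pos hflag] at ih ⊢
      -- prime[p] is still True, hence p is genuinely prime
      have hpprime : Nat.Prime p.toNat := by
        by_contra hnp
        have hsq : p.toNat.minFac ^ 2 ≤ p.toNat := Nat.minFac_sq_le_self (by omega) hnp
        have hsq' : p.toNat.minFac * p.toNat.minFac ≤ p.toNat := by rwa [pow_two] at hsq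
        have hq := Nat.minFac_prime (show p.toNat ≠ 1 by omega)
        have hqlt : p.toNat.minFac < p.toNat := by
          have h2q := hq.two_le
          calc p.toNat.minFac < p.toNat.minFac * 2 := by omega
            _ ≤ p.toNat.minFac * p.toNat.minFac := Nat.mul_le_mul le_rfl h2q
            _ ≤ p.toNat := hsq'
        have hmk : Marked limit p p.toNat := by
          refine ⟨p.toNat.minFac, p.toNat / p.toNat.minFac, hq, by omega, ?_, ?_,
            Nat.mul_div_cancel' (Nat.minFac_dvd _)⟩
          · have hc : ((p.toNat.minFac * p.toNat.minFac : Nat) : Int) ≤ ((p.toNat : Nat) : Int) :=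
              by exact_mod_cast hsq'
            push_cast at hc
            have hc2 : ((p.toNat : Nat) : Int) = p := Int.toNat_of_nonneg (by omega)
            linarith [hc, hc2.le, hc2.ge]
          · exact (Nat.le_div_iff_mul_le hq.pos).mpr hsq'
        have hfalse := (hinv p.toNat hpj).mpr hmk
        rw [hflag] at hfalse
        simp at hfalse
      have hlen' : (sieveMark limit p fl).length = fl.length := by
        simp [sieveMark, length_foldl_set]
      have hinv' : ∀ j, j < (sieveMark limit p fl).length →
          ((sieveMark limit p fl).getD j false = false ↔ Marked limit (p + 1) j) := by
        intro j hj
        rw [hlen'] at hj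
        unfold sieveMark
        rw [getD_foldl_set]
        by_cases hc : (∃ i ∈ PySem.List.pyRange (p * p) (limit + 1) p, i.toNat = j) ∧ j < fl.length
        · rw [if_pos hc]
          refine iff_of_true rfl ?_
          obtain ⟨⟨i, hi, hij⟩, -⟩ := hc
          rw [PySem.List.mem_pyRange_iff_of_pos (by omega) i] at hi
          obtain ⟨hi1, hi2, c, hc2⟩ := hi
          have hc0 : 0 ≤ c := by
            by_contra hcc
            linarith [mul_le_mul_of_nonneg_left (show c ≤ -1 by omega) (show (0:Int) ≤ p by omega)]
          have hi0 : 0 ≤ i := le_trans (le_trans (mul_self_nonneg p) hi1) le_rfl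
          refine ⟨p.toNat, (p + c).toNat, hpprime, by omega, ?_, by omega, ?_⟩
          · have hple : ((p.toNat : Nat) : Int) = p := Int.toNat_of_nonneg (by omega)
            rw [hple]
            exact h
          · have h1 : ((p.toNat : Nat) : Int) = p := Int.toNat_of_nonneg (by omega)
            have hcast : ((p.toNat * (p + c).toNat : Nat) : Int) = i := by
              push_cast
              rw [h1, Int.toNat_of_nonneg (by omega : (0:Int) ≤ p + c)]
              linear_combination -hc2
            omega
        · rw [if_neg hc]
          rw [hinv j hj]
          constructor
          · rintro ⟨q, m, hq, hqp, hqq, hqm, hjq⟩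
            exact ⟨q, m, hq, by omega, hqq, hqm, hjq⟩
          · rintro ⟨q, m, hq, hqp, hqq, hqm, hjq⟩
            rcases (by omega : (q : Int) < p ∨ (q : Int) = p) with hlt | heq
            · exact ⟨q, m, hq, hlt, hqq, hqm, hjq⟩
            · exfalso
              apply hc
              refine ⟨⟨(j : Int), ?_, by omega⟩, hj⟩
              rw [PySem.List.mem_pyRange_iff_of_pos (by omega)]
              have hjq' : (q : Int) * (m : Int) = (j : Int) := by exact_mod_cast hjq
              rw [heq] at hjq'
              have hpm : p ≤ (m : Int) := by
                have hc1 : (q : Int) ≤ (m : Int) := by exact_mod_cast hqm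
                omega
              refine ⟨?_, by omega, ⟨(m : Int) - p, by linear_combination -hjq'⟩⟩
              have hpp : p * p ≤ p * (m : Int) :=
                mul_le_mul_of_nonneg_left hpm (by omega)
              linarith [hjq']
      intro j hj
      refine ih (by omega) (by rw [hlen']; exact hlen) hinv' j (by rw [hlen']; exact hj)
    · rw [if_neg hflag] at ih ⊢
      -- prime[p] is already False: p is composite, its multiples are already covered
      have hmk : Marked limit p p.toNat := by
        refine (hinv p.toNat hpj).mp ?_
        cases hfb : fl.getD p.toNat false
        · rfl
        · exact absurd hfb hflag
      have hinv' : ∀ j, j < fl.length → (fl.getD j false = false ↔ Marked limit (p + 1) j) := by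
        intro j hj
        rw [hinv j hj]
        constructor
        · rintro ⟨q, m, hq, hqp, hqq, hqm, hjq⟩
          exact ⟨q, m, hq, by omega, hqq, hqm, hjq⟩
        · rintro ⟨q, m, hq, hqp, hqq, hqm, hjq⟩
          rcases (by omega : (q : Int) < p ∨ (q : Int) = p) with hlt | heq
          · exact ⟨q, m, hq, hlt, hqq, hqm, hjq⟩
          · obtain ⟨q0, m0, hq0, hq0p, hq0q, hq0m, hq0e⟩ := hmk
            refine ⟨q0, m0 * m, hq0, by omega, hq0q, ?_, ?_⟩
            · calc q0 ≤ m0 := hq0m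
                _ ≤ m0 * m := Nat.le_mul_of_pos_right m0 (by
                    have := hq.two_le
                    omega)
            · have hqp' : q = p.toNat := by omega
              rw [← Nat.mul_assoc, hq0e, ← hqp']
              exact hjq
      intro j hj
      exact ih (by omega) hlen hinv' j hj
  | case2 fl p h =>
    intro hp hlen hinv j hj
    rw [hinv j hj]
    constructor
    · rintro ⟨q, m, hq, -, hqq, hqm, hjq⟩
      exact ⟨q, m, hq, hqq, hqm, hjq⟩
    · rintro ⟨q, m, hq, hqq, hqm, hjq⟩
      refine ⟨q, m, hq, ?_, hqq, hqm, hjq⟩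
      by_contra hh
      have hh' : p ≤ (q : Int) := by omega
      have h1 : p * p ≤ (q : Int) * q :=
        mul_le_mul hh' hh' (by omega) (by omega)
      exact h (le_trans h1 hqq)

theorem markedF_iff_not_prime (limit : Int) (j : Nat)
    (h2 : 2 ≤ j) (hle : (j : Int) ≤ limit) :
    MarkedF limit j ↔ ¬ Nat.Prime j := by
  constructor
  · rintro ⟨q, m, hq, hqq, hqm, hjq⟩ hpj
    have hdvd : q ∣ j := ⟨m, hjq.symm⟩
    rcases hpj.eq_one_or_self_of_dvd q hdvd with h1 | h1
    · exact absurd h1 hq.one_lt.ne'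
    · have hm1 : m = 1 := by
        refine Nat.eq_of_mul_eq_mul_left hq.pos ?_
        omega
      have := hq.two_le
      omega
  · intro hnp
    have hsq : j.minFac ^ 2 ≤ j := Nat.minFac_sq_le_self (by omega) hnp
    have hsq' : j.minFac * j.minFac ≤ j := by rwa [pow_two] at hsq
    refine ⟨j.minFac, j / j.minFac, Nat.minFac_prime (by omega), ?_, ?_,
      Nat.mul_div_cancel' (Nat.minFac_dvd j)⟩
    · have hc : ((j.minFac * j.minFac : Nat) : Int) ≤ ((j : Nat) : Int) := by exact_mod_cast hsq'
      push_cast at hc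
      linarith
    · exact (Nat.le_div_iff_mul_le (Nat.minFac_pos j)).mpr hsq'

theorem is_prime_loop_spec (n : Int) : ∀ d : Int, 2 ≤ d →
    (is_prime_loop n d = true ↔ ∀ e : Int, d ≤ e → e * e ≤ n → ¬ e ∣ n) := by
  intro d
  fun_induction is_prime_loop n d with
  | case1 d h hm =>
    intro hd
    refine iff_of_false (by simp) ?_
    intro hall
    exact hall d le_rfl h ((PySem.Int.mod_eq_zero_iff_dvd n d).mp (by simpa using hm))
  | case2 d h hm ih =>
    intro hd
    rw [ih (by omega)]
    constructor
    · intro hall e hde hee hdvd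
      rcases (by omega : e = d ∨ d + 1 ≤ e) with rfl | hlt
      · have hz : PySem.Int.mod n e = 0 := (PySem.Int.mod_eq_zero_iff_dvd n e).mpr hdvd
        simp [hz] at hm
      · exact hall e hlt hee hdvd
    · intro hall e hde hee
      exact hall e (by omega) hee
  | case3 d h =>
    intro hd
    refine iff_of_true rfl ?_
    intro e hde hee hdvd
    have h1 : d * d ≤ e * e := mul_le_mul hde hde (by omega) (by omega)
    exact h (le_trans h1 hee)

theorem is_prime_iff (n : Int) (h2 : 2 ≤ n) :
    is_prime n = true ↔ Nat.Prime n.toNat := by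
  unfold is_prime
  rw [if_neg (by omega : ¬ n < 2), is_prime_loop_spec n 2 (le_refl 2)]
  constructor
  · intro hall
    by_contra hnp
    have hsq : n.toNat.minFac ^ 2 ≤ n.toNat := Nat.minFac_sq_le_self (by omega) hnp
    have hsq' : n.toNat.minFac * n.toNat.minFac ≤ n.toNat := by rwa [pow_two] at hsq
    have hq := Nat.minFac_prime (show n.toNat ≠ 1 by omega)
    have hb : (2 : Int) ≤ (n.toNat.minFac : Int) := by exact_mod_cast hq.two_le
    have hc : ((n.toNat.minFac * n.toNat.minFac : Nat) : Int) ≤ ((n.toNat : Nat) : Int) := by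
      exact_mod_cast hsq'
    push_cast at hc
    have hc2 : ((n.toNat : Nat) : Int) = n := Int.toNat_of_nonneg (by omega)
    have hdvd : (n.toNat.minFac : Int) ∣ n := by
      have h5 : ((n.toNat.minFac : Nat) : Int) ∣ ((n.toNat : Nat) : Int) :=
        Int.natCast_dvd_natCast.mpr (Nat.minFac_dvd _)
      rwa [hc2] at h5
    exact hall (n.toNat.minFac : Int) hb (by linarith) hdvd
  · intro hp e he2 hee hdvd
    have he0 : ((e.toNat : Nat) : Int) = e := Int.toNat_of_nonneg (by omega)
    have hn0 : ((n.toNat : Nat) : Int) = n := Int.toNat_of_nonneg (by omega)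
    have hdvd' : e.toNat ∣ n.toNat := by
      rw [← Int.natCast_dvd_natCast, he0, hn0]
      exact hdvd
    rcases hp.eq_one_or_self_of_dvd e.toNat hdvd' with h1 | h1
    · omega
    · have he : e = n := by omega
      rw [he] at hee
      linarith [mul_le_mul_of_nonneg_left h2 (show (0:Int) ≤ n by omega)]

theorem flag_eq_is_prime (limit i : Int) (h2 : 2 ≤ i) (hle : i ≤ limit) :
    (sieveLoop limit (List.replicate (limit + 1).toNat true) 2).getD i.toNat false
      = is_prime i := by
  have hbase : ∀ j, j < (List.replicate (limit + 1).toNat true).length →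
      ((List.replicate (limit + 1).toNat true).getD j false = false ↔ Marked limit 2 j) := by
    intro j hj
    rw [List.length_replicate] at hj
    rw [List.getD_eq_getElem?_getD, List.getElem?_replicate, if_pos hj]
    refine iff_of_false (by simp) ?_
    rintro ⟨q, m, hq, hq2, -⟩
    have := hq.two_le
    omega
  have hiff := sieveLoop_correct limit (List.replicate (limit + 1).toNat true) 2
      (le_refl 2) List.length_replicate hbase i.toNat
      (by rw [List.length_replicate]; omega)
  rw [markedF_iff_not_prime limit i.toNat (by omega) (by omega)] at hiff
  have hpiff := is_prime_iff i h2
  cases hb : (sieveLoop limit (List.replicate (limit + 1).toNat true) 2).getD i.toNat false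
  · rw [hb] at hiff
    have hnp : ¬ Nat.Prime i.toNat := hiff.mp rfl
    have hne : is_prime i ≠ true := fun ht => hnp (hpiff.mp ht)
    simp only [Bool.not_eq_true] at hne
    exact hne.symm
  · rw [hb] at hiff
    have hp : Nat.Prime i.toNat := by
      by_contra hnp
      have := hiff.mpr hnp
      simp at this
    exact (hpiff.mpr hp).symm

-- ===== VERDICT (by name: the statement is the Claim_ definition above) =====
theorem prime_sieve_and_pandigital_spec : Claim_equal_prime_sieve_and_pandigital := by
  intro limit _
  show _ = _
  unfold prime_sieve_and_pandigital prime_sieve_and_pandigital_alt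
  rw [PySem.List.foldl_append_if_eq_filter]
  rw [List.nil_append]
  have hlen : ((sieveLoop limit (List.replicate (limit + 1).toNat true) 2).length : Int)
      = ((limit + 1).toNat : Int) := by
    rw [length_sieveLoop, List.length_replicate]
  rw [hlen]
  have hrange : PySem.List.pyRange 2 ((limit + 1).toNat : Int) 1
      = PySem.List.pyRange 2 (limit + 1) 1 := by
    rcases (by omega : 0 ≤ limit + 1 ∨ limit + 1 < 0) with h | h
    · rw [Int.toNat_of_nonneg h]
    · rw [PySem.List.pyRange_one_eq_nil (by omega), PySem.List.pyRange_one_eq_nil (by omega)]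
  rw [hrange]
  apply List.filter_congr
  intro i hi
  rw [PySem.List.mem_pyRange_one] at hi
  rw [flag_eq_is_prime limit i hi.1 (by omega)]
  exact Bool.and_comm _ _
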